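-- pv_equiv track=rewrite | github.com/nayoung16/CodingTest | 프로그래머스/2/172927. 광물 캐기/광물 캐기.py | solution
-- ===== SOURCE A (Python) =====
-- def solution(picks, minerals):
--     answer = 0
--     graph = [[1,1,1],[5,1,1],[25,5,1]]
--
--     gogks = dict()
--     total_gogks = 0
--     for i in range(3):
--         gogks[i] = picks[i]
--         total_gogks += picks[i]
--
--     minerals = minerals[:total_gogks * 5]
--
--     def cal_price(bundle, g):
--         cur_answer = 0
--         cur_minerals = bundle[1:][0]
--         for miner in cur_minerals:
--             if miner == 'diamond':
--                 cur_answer += graph[g][0]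
--             elif miner == 'iron':
--                 cur_answer += graph[g][1]
--             elif miner == 'stone':
--                 cur_answer += graph[g][2]
--         return cur_answer
--
--     l = len(minerals)
--
--     # 돌 곡괭이 기준으로 우선순위 정렬
--     bundles = []
--     for i in range(0,l,5):
--         chunk = minerals[i:i+5]
--         cost = 0
--         cost += chunk.count("diamond") * 25
--         cost += chunk.count("iron") * 5
--         cost += chunk.count("stone") * 1
--         bundles.append((cost, chunk))
--     bundles.sort(key=lambda x:x[0], reverse=True)
--
--     for bundle in bundles:
--         min_price = 25 * 5
--         min_gogk = 2
--         if total_gogks == 0: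
--             break
--         for g in range(3):
--             cur_answer = 0
--             if gogks[g] == 0:
--                 continue
--             elif gogks[g] > 0:
--                 cur_answer = cal_price(bundle,g)
--             if cur_answer < min_price:
--                 min_price = cur_answer
--                 min_gogk = g
--         answer += min_price
--         gogks[min_gogk] -= 1
--         total_gogks -= 1
--
--     return answer
-- ===== SOURCE B (Python) =====
-- def solution(picks, minerals):
--     # Count-based greedy: truncate, score each 5-chunk, sort by stone-pick cost
--     # descending, then hand out picks in order diamond -> iron -> stone.
--     d_p, i_p = picks[0], picks[1]
--     total = d_p + i_p + picks[2]
--     minerals = minerals[:total * 5]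
--     groups = [minerals[i:i + 5] for i in range(0, len(minerals), 5)]
--     scored = sorted(
--         [(25 * c.count("diamond") + 5 * c.count("iron") + c.count("stone"), c)
--          for c in groups],
--         key=lambda t: t[0], reverse=True)
--     answer = 0
--     for cost, chunk in scored:
--         if d_p > 0:
--             d_p -= 1
--             answer += chunk.count("diamond") + chunk.count("iron") + chunk.count("stone")
--         elif i_p > 0:
--             i_p -= 1
--             answer += 5 * chunk.count("diamond") + chunk.count("iron") + chunk.count("stone")
--         else:
--             answer += cost
--     return answer
-- ===== Notes on version B (the rewrite author's own statement) =====
-- stated objective: simpler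
-- what changed: B replaces A's pick-count dict, per-bundle min-over-3-picks loop with the cal_price element rescans, and the break/total counter by direct counting: score each 5-chunk once with .count, sort descending by stone-pick cost, then hand out picks positionally in order diamond, iron, stone, adding the cost straight from the count multipliers.
-- outside the precondition, e.g. on solution([-1, 2, 1], ['diamond', 'stone']): A returns 0, B returns 6
import Mathlib
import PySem

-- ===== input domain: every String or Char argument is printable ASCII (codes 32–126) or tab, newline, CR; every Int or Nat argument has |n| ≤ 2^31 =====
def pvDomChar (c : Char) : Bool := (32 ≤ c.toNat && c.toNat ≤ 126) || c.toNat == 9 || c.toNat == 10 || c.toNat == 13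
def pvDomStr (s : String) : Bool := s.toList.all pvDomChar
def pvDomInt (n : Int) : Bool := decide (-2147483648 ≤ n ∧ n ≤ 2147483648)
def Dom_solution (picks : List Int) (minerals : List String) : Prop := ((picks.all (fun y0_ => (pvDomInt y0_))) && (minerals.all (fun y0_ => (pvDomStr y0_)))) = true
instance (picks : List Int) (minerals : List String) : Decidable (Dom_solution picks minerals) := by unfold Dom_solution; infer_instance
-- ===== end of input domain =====

-- B replaces A's pick dict + min-over-3-picks rescan loop by one scoring pass and
-- positional pick hand-out (diamond, iron, stone) over the same descending sort; equal return values on Pre_.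

-- ===== PORT A =====
def graphA : List (List Int) := [[1, 1, 1], [5, 1, 1], [25, 5, 1]]

-- cal_price: bundle[1:][0] of the pair (cost, chunk) is the chunk, i.e. bundle.2
def calPriceA (bundle : Int × List String) (g : Int) : Int :=
  bundle.2.foldl (fun curAnswer miner =>
    if miner = "diamond" then curAnswer + PySem.List.pyGetD (PySem.List.pyGetD graphA g []) 0 0
    else if miner = "iron" then curAnswer + PySem.List.pyGetD (PySem.List.pyGetD graphA g []) 1 0
    else if miner = "stone" then curAnswer + PySem.List.pyGetD (PySem.List.pyGetD graphA g []) 2 0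
    else curAnswer) 0

-- the 'for bundle in bundles' loop with its break
def loopA (bundles : List (Int × List String)) (answer : Int)
    (gogks : PySem.Dict Int Int) (total : Int) : Int :=
  match bundles with
  | [] => answer
  | bundle :: rest =>
    let minPrice : Int := 25 * 5
    let minGogk : Int := 2
    if total = 0 then answer
    else
      let mm := (PySem.List.pyRange 0 3 1).foldl (fun (s : Int × Int) g =>
        let curAnswer : Int := 0
        if gogks.getD g 0 = 0 then s
        else
          let curAnswer := if gogks.getD g 0 > 0 then calPriceA bundle g else curAnswer
          if curAnswer < s.1 then (curAnswer, g) else s) (minPrice, minGogk)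
      loopA rest (answer + mm.1) (gogks.insert mm.2 (gogks.getD mm.2 0 - 1)) (total - 1)

def solution (picks : List Int) (minerals : List String) : Int :=
  let answer : Int := 0
  let init := (PySem.List.pyRange 0 3 1).foldl
    (fun (s : PySem.Dict Int Int × Int) i =>
      (s.1.insert i (PySem.List.pyGetD picks i 0), s.2 + PySem.List.pyGetD picks i 0))
    (PySem.Dict.empty, 0)
  let gogks := init.1
  let totalGogks := init.2
  let minerals1 := PySem.List.slice minerals none (some (totalGogks * 5))
  let l : Int := (minerals1.length : Int)
  let bundles := (PySem.List.pyRange 0 l 5).foldl (fun bs i =>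
    let chunk := PySem.List.slice minerals1 (some i) (some (i + 5))
    let cost : Int := 0 + (PySem.List.count chunk "diamond" : Int) * 25
      + (PySem.List.count chunk "iron" : Int) * 5
      + (PySem.List.count chunk "stone" : Int) * 1
    bs ++ [(cost, chunk)]) []
  let bundles2 := PySem.List.sorted bundles (fun x => x.1) true
  loopA bundles2 answer gogks totalGogks

-- ===== PORT B =====
def stepB (s : Int × Int × Int) (p : Int × List String) : Int × Int × Int :=
  if s.1 > 0 then
    (s.1 - 1, s.2.1, s.2.2 + ((PySem.List.count p.2 "diamond" : Int)
      + (PySem.List.count p.2 "iron" : Int) + (PySem.List.count p.2 "stone" : Int)))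
  else if s.2.1 > 0 then
    (s.1, s.2.1 - 1, s.2.2 + (5 * (PySem.List.count p.2 "diamond" : Int)
      + (PySem.List.count p.2 "iron" : Int) + (PySem.List.count p.2 "stone" : Int)))
  else
    (s.1, s.2.1, s.2.2 + p.1)

def solution_alt (picks : List Int) (minerals : List String) : Int :=
  let dP := PySem.List.pyGetD picks 0 0
  let iP := PySem.List.pyGetD picks 1 0
  let total := dP + iP + PySem.List.pyGetD picks 2 0
  let minerals1 := PySem.List.slice minerals none (some (total * 5))
  let groups := (PySem.List.pyRange 0 (minerals1.length : Int) 5).map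
    (fun i => PySem.List.slice minerals1 (some i) (some (i + 5)))
  let scored := PySem.List.sorted
    (groups.map (fun c =>
      (25 * (PySem.List.count c "diamond" : Int) + 5 * (PySem.List.count c "iron" : Int)
        + (PySem.List.count c "stone" : Int), c)))
    (fun t => t.1) true
  let fin := scored.foldl stepB (dP, iP, 0)
  fin.2.2

-- ===== PRECONDITION & SPEC =====
-- Pre_ excludes picks lists shorter than 3 (A raises IndexError) and negative
-- counts among the first three picks, which lie outside the problem's natural
-- domain of nonnegative pick counts (A's min-loop then treats a negative counter
-- as a free zero-cost pick); it still admits any picks when the truncation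
-- empties the mineral list (both programs then mine nothing).
def Pre_solution (picks : List Int) (minerals : List String) : Prop :=
  3 ≤ picks.length ∧
    ((∀ x ∈ picks.take 3, 0 ≤ x) ∨ (minerals.length : Int) + (picks.take 3).sum * 5 ≤ 0)
instance (picks : List Int) (minerals : List String) : Decidable (Pre_solution picks minerals) := by
  unfold Pre_solution; infer_instance

def pvWitness_solution : List Int × List String :=
  ([1, 1, 1], ["diamond", "stone", "iron", "stone", "stone", "iron"])

def Spec_solution (picks : List Int) (minerals : List String) (out : Int) : Prop := out = solution_alt picks minerals
instance (picks : List Int) (minerals : List String) (out : Int) : Decidable (Spec_solution picks minerals out) := by unfold Spec_solution; infer_instance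

-- ===== CLAIM (what is proved, stated in full; the proofs are below) =====
def Claim_equal_solution : Prop := ∀ (picks : List Int) (minerals : List String), Dom_solution picks minerals → Pre_solution picks minerals → Spec_solution picks minerals (solution picks minerals)

-- ===== LEMMAS AND PROOFS =====

-- the three-key dict that A's gogks always is
def D3 (a b c : Int) : PySem.Dict Int Int := PySem.Dict.mk [(0, a), (1, b), (2, c)]

theorem D3_getD0 (a b c : Int) : (D3 a b c).getD 0 0 = a := by
  simp [D3, PySem.Dict.getD, PySem.Dict.get?_mk_cons]
theorem D3_getD1 (a b c : Int) : (D3 a b c).getD 1 0 = b := by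
  simp [D3, PySem.Dict.getD, PySem.Dict.get?_mk_cons]
theorem D3_getD2 (a b c : Int) : (D3 a b c).getD 2 0 = c := by
  simp [D3, PySem.Dict.getD, PySem.Dict.get?_mk_cons]
theorem D3_ins0 (a b c x : Int) : (D3 a b c).insert 0 x = D3 x b c := by
  simp [D3, PySem.Dict.insert, PySem.Dict.contains]
theorem D3_ins1 (a b c x : Int) : (D3 a b c).insert 1 x = D3 a x c := by
  simp [D3, PySem.Dict.insert, PySem.Dict.contains]
theorem D3_ins2 (a b c x : Int) : (D3 a b c).insert 2 x = D3 a b x := by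
  simp [D3, PySem.Dict.insert, PySem.Dict.contains]

-- the cal_price fold in closed count form
theorem calfold (chunk : List String) (acc x y z : Int) :
    chunk.foldl (fun cur m =>
      if m = "diamond" then cur + x else if m = "iron" then cur + y
      else if m = "stone" then cur + z else cur) acc
    = acc + x * (chunk.count "diamond" : Int) + y * (chunk.count "iron" : Int)
        + z * (chunk.count "stone" : Int) := by
  induction chunk generalizing acc with
  | nil => simp
  | cons m t ih =>
    simp only [List.foldl_cons, List.count_cons, ih]
    by_cases h1 : m = "diamond"
    · subst h1; simp; ring
    · by_cases h2 : m = "iron"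
      · subst h2; simp; ring
      · by_cases h3 : m = "stone"
        · subst h3; simp; ring
        · simp [h1, h2, h3]

theorem counts_le_length (chunk : List String) :
    chunk.count "diamond" + chunk.count "iron" + chunk.count "stone" ≤ chunk.length := by
  induction chunk with
  | nil => simp
  | cons m t ih =>
    simp only [List.count_cons, List.length_cons]
    by_cases h1 : m = "diamond"
    · subst h1; simp; omega
    · by_cases h2 : m = "iron"
      · subst h2; simp; omega
      · by_cases h3 : m = "stone"
        · subst h3; simp; omega
        · simp [h1, h2, h3]; omega

theorem calPriceA0 (co : Int) (chunk : List String) :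
    calPriceA (co, chunk) 0 = (chunk.count "diamond" : Int) + (chunk.count "iron" : Int)
      + (chunk.count "stone" : Int) := by
  simp only [calPriceA,
    show PySem.List.pyGetD (PySem.List.pyGetD graphA 0 []) 0 0 = 1 from by decide,
    show PySem.List.pyGetD (PySem.List.pyGetD graphA 0 []) 1 0 = 1 from by decide,
    show PySem.List.pyGetD (PySem.List.pyGetD graphA 0 []) 2 0 = 1 from by decide]
  rw [calfold]; ring
theorem calPriceA1 (co : Int) (chunk : List String) :
    calPriceA (co, chunk) 1 = 5 * (chunk.count "diamond" : Int) + (chunk.count "iron" : Int)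
      + (chunk.count "stone" : Int) := by
  simp only [calPriceA,
    show PySem.List.pyGetD (PySem.List.pyGetD graphA 1 []) 0 0 = 5 from by decide,
    show PySem.List.pyGetD (PySem.List.pyGetD graphA 1 []) 1 0 = 1 from by decide,
    show PySem.List.pyGetD (PySem.List.pyGetD graphA 1 []) 2 0 = 1 from by decide]
  rw [calfold]; ring
theorem calPriceA2 (co : Int) (chunk : List String) :
    calPriceA (co, chunk) 2 = 25 * (chunk.count "diamond" : Int) + 5 * (chunk.count "iron" : Int)
      + (chunk.count "stone" : Int) := by
  simp only [calPriceA,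
    show PySem.List.pyGetD (PySem.List.pyGetD graphA 2 []) 0 0 = 25 from by decide,
    show PySem.List.pyGetD (PySem.List.pyGetD graphA 2 []) 1 0 = 5 from by decide,
    show PySem.List.pyGetD (PySem.List.pyGetD graphA 2 []) 2 0 = 1 from by decide]
  rw [calfold]; ring

-- A's inner min-over-picks loop selects the strongest still-available pick
set_option maxHeartbeats 4000000 in
theorem inner_sel (bundle : Int × List String) (a b c : Int)
    (ha : 0 ≤ a) (hb : 0 ≤ b) (hc : 0 ≤ c) (hlen : bundle.2.length ≤ 5) :
    (PySem.List.pyRange 0 3 1).foldl (fun (s : Int × Int) g =>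
        let curAnswer : Int := 0
        if (D3 a b c).getD g 0 = 0 then s
        else
          let curAnswer := if (D3 a b c).getD g 0 > 0 then calPriceA bundle g else curAnswer
          if curAnswer < s.1 then (curAnswer, g) else s) ((25 * 5 : Int), (2 : Int))
    = if 0 < a then (calPriceA bundle 0, 0)
      else if 0 < b then (calPriceA bundle 1, 1)
      else if 0 < c then (calPriceA bundle 2, 2)
      else ((25 * 5 : Int), (2 : Int)) := by
  obtain ⟨co, chunk⟩ := bundle
  have hcnt : chunk.count "diamond" + chunk.count "iron" + chunk.count "stone" ≤ 5 := by
    have := counts_le_length chunk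
    simpa using le_trans this hlen
  rw [show PySem.List.pyRange 0 3 1 = [0, 1, 2] from by decide]
  simp only [List.foldl_cons, List.foldl_nil, D3_getD0, D3_getD1, D3_getD2,
    calPriceA0, calPriceA1, calPriceA2]
  split_ifs <;>
    first
      | rfl
      | (exfalso; omega)
      | (refine Prod.ext ?_ ?_ <;> simp <;> omega)

-- main loop equivalence: A's loop = B's positional hand-out fold
theorem loop_eq (bs : List (Int × List String)) : ∀ (a b c ans : Int),
    0 ≤ a → 0 ≤ b → 0 ≤ c → (bs.length : Int) ≤ a + b + c →
    (∀ p ∈ bs, p.2.length ≤ 5) →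
    (∀ p ∈ bs, p.1 = 25 * (p.2.count "diamond" : Int) + 5 * (p.2.count "iron" : Int)
        + (p.2.count "stone" : Int)) →
    loopA bs ans (D3 a b c) (a + b + c) = (bs.foldl stepB (a, b, ans)).2.2 := by
  induction bs with
  | nil => intro a b c ans _ _ _ _ _ _; simp [loopA]
  | cons p rest ih =>
    intro a b c ans ha hb hc hlen hsz hfmt
    obtain ⟨co, chunk⟩ := p
    have hlen5 : chunk.length ≤ 5 := by simpa using hsz (co, chunk) List.mem_cons_self
    have hco : co = 25 * (chunk.count "diamond" : Int) + 5 * (chunk.count "iron" : Int)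
        + (chunk.count "stone" : Int) := by simpa using hfmt (co, chunk) List.mem_cons_self
    have hne : ¬(a + b + c = 0) := by
      simp only [List.length_cons] at hlen; push_cast at hlen; omega
    simp only [loopA, if_neg hne, List.foldl_cons]
    rw [inner_sel (co, chunk) a b c ha hb hc hlen5]
    by_cases h0 : 0 < a
    · simp only [if_pos h0, D3_getD0, D3_ins0, calPriceA0]
      rw [show a + b + c - 1 = (a - 1) + b + c from by ring,
        ih (a - 1) b c _ (by omega) hb hc
          (by simp only [List.length_cons] at hlen; push_cast at hlen ⊢; omega)
          (fun p hp => hsz p (List.mem_cons_of_mem _ hp))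
          (fun p hp => hfmt p (List.mem_cons_of_mem _ hp))]
      congr 1
      simp [stepB, if_pos h0, PySem.List.count_eq]
    · by_cases h1 : 0 < b
      · simp only [if_neg h0, if_pos h1, D3_getD1, D3_ins1, calPriceA1]
        rw [show a + b + c - 1 = a + (b - 1) + c from by ring,
          ih a (b - 1) c _ ha (by omega) hc
            (by simp only [List.length_cons] at hlen; push_cast at hlen ⊢; omega)
            (fun p hp => hsz p (List.mem_cons_of_mem _ hp))
            (fun p hp => hfmt p (List.mem_cons_of_mem _ hp))]
        congr 1
        simp [stepB, if_neg (show ¬ a > 0 from h0), if_pos h1, PySem.List.count_eq]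
      · have h2 : 0 < c := by
          simp only [List.length_cons] at hlen; push_cast at hlen; omega
        simp only [if_neg h0, if_neg h1, if_pos h2, D3_getD2, D3_ins2, calPriceA2]
        rw [show a + b + c - 1 = a + b + (c - 1) from by ring,
          ih a b (c - 1) _ ha hb (by omega)
            (by simp only [List.length_cons] at hlen; push_cast at hlen ⊢; omega)
            (fun p hp => hsz p (List.mem_cons_of_mem _ hp))
            (fun p hp => hfmt p (List.mem_cons_of_mem _ hp))]
        congr 1
        simp [stepB, if_neg (show ¬ a > 0 from h0), if_neg (show ¬ b > 0 from h1),
          PySem.List.count_eq, hco]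

-- picks[i] on a ≥3-element list
theorem pyGetD_cons0 (p0 p1 p2 : Int) (rest : List Int) :
    PySem.List.pyGetD (p0 :: p1 :: p2 :: rest) 0 0 = p0 := by
  simp [PySem.List.pyGetD, PySem.List.pyGet?, PySem.List.pyIdx?]
  split_ifs with h
  · simp
  · exfalso; push_cast at h; omega
theorem pyGetD_cons1 (p0 p1 p2 : Int) (rest : List Int) :
    PySem.List.pyGetD (p0 :: p1 :: p2 :: rest) 1 0 = p1 := by
  simp [PySem.List.pyGetD, PySem.List.pyGet?, PySem.List.pyIdx?]
  split_ifs with h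
  · simp
  · exfalso; push_cast at h; omega
theorem pyGetD_cons2 (p0 p1 p2 : Int) (rest : List Int) :
    PySem.List.pyGetD (p0 :: p1 :: p2 :: rest) 2 0 = p2 := by
  simp [PySem.List.pyGetD, PySem.List.pyGet?, PySem.List.pyIdx?]
  split_ifs with h
  · simp
  · exfalso; push_cast at h; omega

theorem dict_build (p0 p1 p2 : Int) :
    ((PySem.Dict.empty.insert 0 p0).insert 1 p1).insert 2 p2 = D3 p0 p1 p2 := by
  simp [PySem.Dict.insert, PySem.Dict.empty, PySem.Dict.contains, D3]

theorem range5_len (l T : Int) (hT : l ≤ T * 5) (hT0 : 0 ≤ T) :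
    ((PySem.List.pyRange 0 l 5).length : Int) ≤ T := by
  rw [PySem.List.pyRange_of_pos _ _ (by norm_num : (0:Int) < 5)]
  simp only [List.length_map, List.length_range]
  split_ifs with h <;> push_cast <;> omega

theorem slice5_len (xs : List String) (i : Int) :
    (PySem.List.slice xs (some i) (some (i + 5))).length ≤ 5 := by
  rw [PySem.List.length_slice]
  simp only [PySem.List.clampIdx]
  split_ifs <;> omega

-- the two bundle-building passes produce the same list
theorem build_eq (ms : List String) :
    (PySem.List.pyRange 0 (ms.length : Int) 5).foldl (fun bs i =>
        bs ++ [(((PySem.List.count (PySem.List.slice ms (some i) (some (i + 5))) "diamond" : Int) * 25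
          + (PySem.List.count (PySem.List.slice ms (some i) (some (i + 5))) "iron" : Int) * 5
          + (PySem.List.count (PySem.List.slice ms (some i) (some (i + 5))) "stone" : Int) * 1 : Int),
          PySem.List.slice ms (some i) (some (i + 5)))]) []
    = ((PySem.List.pyRange 0 (ms.length : Int) 5).map
        (fun i => PySem.List.slice ms (some i) (some (i + 5)))).map
        (fun c => (25 * (PySem.List.count c "diamond" : Int) + 5 * (PySem.List.count c "iron" : Int)
          + (PySem.List.count c "stone" : Int), c)) := by
  rw [PySem.List.foldl_append_singleton_eq_map, List.map_map, List.nil_append]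
  refine List.map_congr_left (fun i _ => ?_)
  simp only [Function.comp_apply]
  exact Prod.ext (by ring) rfl

-- ===== VERDICT (by name: the statement is the Claim_ definition above) =====
theorem solution_spec : Claim_equal_solution := by
  unfold Claim_equal_solution
  intro picks minerals _ hpre
  obtain ⟨hlen3, hnn⟩ := hpre
  match picks, hlen3, hnn with
  | p0 :: p1 :: p2 :: rest, _, hnn =>
  rcases hnn with hnn | hE
  case inr =>
    -- truncation to a nonpositive bound: both sides process no bundles
    have hE' : (minerals.length : Int) + (p0 + p1 + p2) * 5 ≤ 0 := by
      have := hE; simp at this; omega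
    unfold Spec_solution solution solution_alt
    rw [show PySem.List.pyRange 0 3 1 = [0, 1, 2] from by decide]
    simp only [List.foldl_cons, List.foldl_nil,
      pyGetD_cons0, pyGetD_cons1, pyGetD_cons2, dict_build, zero_add]
    have hnil : PySem.List.slice minerals none (some ((p0 + p1 + p2) * 5)) = [] := by
      have hl := PySem.List.length_slice minerals 0 ((p0 + p1 + p2) * 5)
      rw [PySem.List.slice_zero_start] at hl
      refine List.length_eq_zero_iff.mp ?_
      rw [hl]
      simp only [PySem.List.clampIdx]
      split_ifs <;> omega
    rw [hnil]
    have hrange : PySem.List.pyRange 0 ((([] : List String).length : Int)) 5 = [] := by decide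
    rw [hrange]
    simp only [List.foldl_nil, List.map_nil]
    have hsnil : PySem.List.sorted ([] : List (Int × List String)) (fun x => x.1) true = [] :=
      List.length_eq_zero_iff.mp (by rw [PySem.List.length_sorted]; rfl)
    rw [hsnil]
    simp [loopA]
  have h0 : 0 ≤ p0 := hnn p0 (by simp)
  have h1 : 0 ≤ p1 := hnn p1 (by simp)
  have h2 : 0 ≤ p2 := hnn p2 (by simp)
  unfold Spec_solution solution solution_alt
  rw [show PySem.List.pyRange 0 3 1 = [0, 1, 2] from by decide]
  simp only [List.foldl_cons, List.foldl_nil,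
    pyGetD_cons0, pyGetD_cons1, pyGetD_cons2, dict_build, zero_add]
  rw [build_eq]
  set ms := PySem.List.slice minerals none (some ((p0 + p1 + p2) * 5)) with hms
  have hmslen : ((ms.length : Int)) ≤ (p0 + p1 + p2) * 5 := by
    rw [hms, PySem.List.slice_to _ (by positivity)]
    have := List.length_take_le ((p0 + p1 + p2) * 5).toNat minerals
    push_cast
    omega
  refine Eq.trans (loop_eq _ p0 p1 p2 0 h0 h1 h2 ?_ ?_ ?_) rfl
  · rw [PySem.List.length_sorted]
    simp only [List.length_map]
    exact range5_len _ _ hmslen (by omega)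
  · intro p hp
    rw [PySem.List.mem_sorted] at hp
    simp only [List.mem_map] at hp
    obtain ⟨c, ⟨i, hi, rfl⟩, rfl⟩ := hp
    exact slice5_len _ _
  · intro p hp
    rw [PySem.List.mem_sorted] at hp
    simp only [List.mem_map] at hp
    obtain ⟨c, ⟨i, hi, rfl⟩, rfl⟩ := hp
    simp [PySem.List.count_eq]
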